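-- pv_equiv track=rewrite | github.com/ojh6404/eus_imitation | python/eus_imitation/base/base_nets.py | calculate_deconv_output_size
-- ===== SOURCE A (Python) =====
-- from typing import Optional, Union, Tuple, List, Dict
--
-- def calculate_deconv_output_size(
--     input_size: List[int],
--     kernel_sizes: List[int],
--     strides: List[int],
--     paddings: List[int],
--     output_paddings: List[int],
-- ) -> List[int]:
--     assert len(kernel_sizes) == len(strides) == len(paddings) == len(output_paddings)
--     output_size = list(input_size)
--     for i in range(len(kernel_sizes)):
--         output_size[0] = (
--             output_size[0] - 1
--         ) * strides[i] - 2 * paddings[i] + kernel_sizes[i] + output_paddings[i]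
--         output_size[1] = (
--             output_size[1] - 1
--         ) * strides[i] - 2 * paddings[i] + kernel_sizes[i] + output_paddings[i]
--     return output_size
-- ===== SOURCE B (Python) =====
-- def calculate_deconv_output_size(
--     input_size,
--     kernel_sizes,
--     strides,
--     paddings,
--     output_paddings,
-- ):
--     assert len(kernel_sizes) == len(strides) == len(paddings) == len(output_paddings)
--     # Closed form: x_final = x0 * prod(strides) + sum_i c_i * prod_{j>i} strides[j],
--     # computed with one backward pass maintaining (acc, prod).
--     acc, prod = 0, 1
--     for k, s, p, op in reversed(list(zip(kernel_sizes, strides, paddings, output_paddings))):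
--         acc += (k + op - 2 * p - s) * prod
--         prod *= s
--     out = list(input_size)
--     if kernel_sizes:
--         out[0] = input_size[0] * prod + acc
--         out[1] = input_size[1] * prod + acc
--     return out
-- ===== Notes on version B (the rewrite author's own statement) =====
-- stated objective: alternative
-- what changed: Replaces the per-layer forward recurrence applied twice (to indices 0 and 1) by a closed form: one backward pass over the layers builds a running stride-product and accumulator, then each of the two dimensions is obtained with a single multiply-add.
import Mathlib
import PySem

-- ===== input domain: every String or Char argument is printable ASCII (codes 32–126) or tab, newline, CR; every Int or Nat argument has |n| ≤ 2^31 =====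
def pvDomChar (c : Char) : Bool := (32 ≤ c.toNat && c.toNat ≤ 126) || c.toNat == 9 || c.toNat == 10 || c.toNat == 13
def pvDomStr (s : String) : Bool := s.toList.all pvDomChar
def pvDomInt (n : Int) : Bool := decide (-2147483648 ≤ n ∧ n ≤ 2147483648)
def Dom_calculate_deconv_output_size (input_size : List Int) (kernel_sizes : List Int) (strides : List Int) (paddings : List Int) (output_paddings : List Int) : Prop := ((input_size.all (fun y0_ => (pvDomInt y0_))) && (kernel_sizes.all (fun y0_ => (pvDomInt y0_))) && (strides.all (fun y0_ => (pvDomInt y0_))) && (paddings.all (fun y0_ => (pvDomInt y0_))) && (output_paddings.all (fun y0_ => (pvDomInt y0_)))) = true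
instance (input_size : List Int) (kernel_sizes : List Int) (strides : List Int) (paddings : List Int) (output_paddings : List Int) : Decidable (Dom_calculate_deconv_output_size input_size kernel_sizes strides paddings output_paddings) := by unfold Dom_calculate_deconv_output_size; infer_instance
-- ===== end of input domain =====

-- B replaces A's twice-applied forward per-layer recurrence by a closed form computed in
-- one backward pass (running stride-product and accumulator); same O(n) cost, alternative algorithm.

-- ===== PORT A =====
-- Python: for i in range(len(kernel_sizes)): update output_size[0] and output_size[1].
-- List.getD/List.set are exact here: Pre_ guarantees the indices are in range.
def calculate_deconv_output_size (input_size : List Int) (kernel_sizes : List Int) (strides : List Int) (paddings : List Int) (output_paddings : List Int) : List Int :=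
  (List.range kernel_sizes.length).foldl (fun output_size i =>
    let output_size := output_size.set 0
      ((output_size.getD 0 0 - 1) * strides.getD i 0 - 2 * paddings.getD i 0
        + kernel_sizes.getD i 0 + output_paddings.getD i 0)
    output_size.set 1
      ((output_size.getD 1 0 - 1) * strides.getD i 0 - 2 * paddings.getD i 0
        + kernel_sizes.getD i 0 + output_paddings.getD i 0)) input_size

-- ===== PORT B =====
-- backward pass over the zipped layers: acc += (k+op-2p-s)*prod; prod *= s
def calculate_deconv_output_size_alt (input_size : List Int) (kernel_sizes : List Int) (strides : List Int) (paddings : List Int) (output_paddings : List Int) : List Int :=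
  let layers := (kernel_sizes.zip (strides.zip (paddings.zip output_paddings)))
  let ap := layers.foldr (fun l st =>
      (st.1 + (l.1 + l.2.2.2 - 2 * l.2.2.1 - l.2.1) * st.2, st.2 * l.2.1)) ((0 : Int), (1 : Int))
  if kernel_sizes.isEmpty then input_size
  else
    (input_size.set 0 (input_size.getD 0 0 * ap.2 + ap.1)).set 1
      (input_size.getD 1 0 * ap.2 + ap.1)

-- ===== PRECONDITION & SPEC =====
-- Excludes exactly the inputs where Python A raises: the assert (unequal parameter-list
-- lengths) and the IndexError when there is at least one layer but input_size has < 2 entries.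
def Pre_calculate_deconv_output_size (input_size : List Int) (kernel_sizes : List Int) (strides : List Int) (paddings : List Int) (output_paddings : List Int) : Prop :=
  kernel_sizes.length = strides.length ∧ strides.length = paddings.length ∧
  paddings.length = output_paddings.length ∧ (kernel_sizes = [] ∨ 2 ≤ input_size.length)
instance (input_size : List Int) (kernel_sizes : List Int) (strides : List Int) (paddings : List Int) (output_paddings : List Int) : Decidable (Pre_calculate_deconv_output_size input_size kernel_sizes strides paddings output_paddings) := by unfold Pre_calculate_deconv_output_size; infer_instance

def pvWitness_calculate_deconv_output_size : List Int × List Int × List Int × List Int × List Int := ([4, 5], [3], [2], [1], [1])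

def Spec_calculate_deconv_output_size (input_size : List Int) (kernel_sizes : List Int) (strides : List Int) (paddings : List Int) (output_paddings : List Int) (out : List Int) : Prop := out = calculate_deconv_output_size_alt input_size kernel_sizes strides paddings output_paddings
instance (input_size : List Int) (kernel_sizes : List Int) (strides : List Int) (paddings : List Int) (output_paddings : List Int) (out : List Int) : Decidable (Spec_calculate_deconv_output_size input_size kernel_sizes strides paddings output_paddings out) := by unfold Spec_calculate_deconv_output_size; infer_instance

-- ===== CLAIM (what is proved, stated in full; the proofs are below) =====
def Claim_equal_calculate_deconv_output_size : Prop := ∀ (input_size : List Int) (kernel_sizes : List Int) (strides : List Int) (paddings : List Int) (output_paddings : List Int), Dom_calculate_deconv_output_size input_size kernel_sizes strides paddings output_paddings → Pre_calculate_deconv_output_size input_size kernel_sizes strides paddings output_paddings → Spec_calculate_deconv_output_size input_size kernel_sizes strides paddings output_paddings (calculate_deconv_output_size input_size kernel_sizes strides paddings output_paddings)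

-- ===== LEMMAS AND PROOFS =====

-- the layer list both proofs reason over
def pvLayers (ks ss ps ops : List Int) : List (Int × Int × Int × Int) :=
  ks.zip (ss.zip (ps.zip ops))

-- scalar forward recurrence (what A applies to each of the two dimensions)
def pvFwd (x : Int) : List (Int × Int × Int × Int) → Int
  | [] => x
  | l :: ls => pvFwd ((x - 1) * l.2.1 - 2 * l.2.2.1 + l.1 + l.2.2.2) ls

-- B's backward accumulator
def pvAP (ls : List (Int × Int × Int × Int)) : Int × Int :=
  ls.foldr (fun l st => (st.1 + (l.1 + l.2.2.2 - 2 * l.2.2.1 - l.2.1) * st.2, st.2 * l.2.1)) (0, 1)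

-- A's range-indexed fold equals a fold over the zipped layer list
theorem portA_eq_layers (inp : List Int) (ks ss ps ops : List Int)
    (h1 : ks.length = ss.length) (h2 : ss.length = ps.length) (h3 : ps.length = ops.length) :
    calculate_deconv_output_size inp ks ss ps ops =
      (pvLayers ks ss ps ops).foldl (fun out l =>
        let out := out.set 0 ((out.getD 0 0 - 1) * l.2.1 - 2 * l.2.2.1 + l.1 + l.2.2.2)
        out.set 1 ((out.getD 1 0 - 1) * l.2.1 - 2 * l.2.2.1 + l.1 + l.2.2.2)) inp := by
  induction ks generalizing ss ps ops inp with
  | nil => simp [calculate_deconv_output_size, pvLayers]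
  | cons k ks ih =>
    cases ss with
    | nil => simp at h1
    | cons s ss =>
      cases ps with
      | nil => simp at h2
      | cons p ps =>
        cases ops with
        | nil => simp at h3
        | cons op ops =>
          simp only [calculate_deconv_output_size, pvLayers, List.zip_cons_cons,
            List.length_cons, List.range_succ_eq_map, List.foldl_cons, List.foldl_map] at *
          simp only [Nat.succ_eq_add_one, List.getD_cons_succ, List.getD_cons_zero]
          exact ih _ _ _ _ (by omega) (by omega) (by omega)

-- the layer fold on a list with ≥ 2 entries applies pvFwd to the first two entries
theorem layers_fold_cons (ls : List (Int × Int × Int × Int)) (a b : Int) (rest : List Int) :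
    ls.foldl (fun out l =>
        let out := out.set 0 ((out.getD 0 0 - 1) * l.2.1 - 2 * l.2.2.1 + l.1 + l.2.2.2)
        out.set 1 ((out.getD 1 0 - 1) * l.2.1 - 2 * l.2.2.1 + l.1 + l.2.2.2))
      (a :: b :: rest) = pvFwd a ls :: pvFwd b ls :: rest := by
  induction ls generalizing a b with
  | nil => simp [pvFwd]
  | cons l ls ih =>
    rw [List.foldl_cons]
    exact ih _ _

-- closed form: pvFwd x ls = x * prod + acc
theorem pvFwd_eq_ap (ls : List (Int × Int × Int × Int)) (x : Int) :
    pvFwd x ls = x * (pvAP ls).2 + (pvAP ls).1 := by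
  induction ls generalizing x with
  | nil => simp [pvFwd, pvAP]
  | cons l ls ih =>
    simp only [pvFwd, pvAP, List.foldr_cons] at *
    rw [ih]
    ring

-- ===== VERDICT (by name: the statement is the Claim_ definition above) =====
theorem calculate_deconv_output_size_spec : Claim_equal_calculate_deconv_output_size := by
  intro inp ks ss ps ops _ hpre
  obtain ⟨h1, h2, h3, hcase⟩ := hpre
  unfold Spec_calculate_deconv_output_size
  rw [portA_eq_layers inp ks ss ps ops h1 h2 h3]
  rcases hcase with hnil | hlen
  · subst hnil
    simp [pvLayers, calculate_deconv_output_size_alt]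
  · match inp, hlen with
    | a :: b :: rest, _ =>
      rw [layers_fold_cons]
      have hks : ks ≠ [] ∨ ks = [] := Or.symm (em _)
      unfold calculate_deconv_output_size_alt
      rcases hks with hne | hnilk
      · simp only [List.isEmpty_iff, hne, List.set, List.getD_cons_zero,
          List.getD_cons_succ]
        rw [pvFwd_eq_ap, pvFwd_eq_ap]
        rfl
      · subst hnilk
        simp [pvLayers, pvFwd]
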